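-- pv_equiv track=rewrite | github.com/ariuk44/retake_exam_prep | day_12.py | isComplete2
-- ===== SOURCE A (Python) =====
-- def isComplete2(arr):
--     maxEven = None
--     for i in arr:
--         if i <= 0:
--             return 0
--         if i % 2 == 0:
--             if maxEven is None or i > maxEven:
--                 maxEven = i
--     if maxEven is None:
--         return 0
--     for v in range(2, maxEven, 2):
--         found = 0
--         for i in arr:
--             if v == i:
--                 found = 1
--                 break
--         if found == 0:
--             return 0
--     return 1
-- ===== SOURCE B (Python) =====
-- def isComplete2(arr):
--     evens = set()
--     for i in arr:
--         if i <= 0: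
--             return 0
--         if i % 2 == 0:
--             evens.add(i)
--     if not evens:
--         return 0
--     maxEven = max(evens)
--     return 1 if sorted(evens) == list(range(2, maxEven + 1, 2)) else 0
-- ===== Notes on version B (the rewrite author's own statement) =====
-- stated objective: alternative
-- what changed: A rescans arr once for every required even in range(2, maxEven, 2); B makes one pass collecting the even values into a set and decides completeness by a single comparison of sorted(evens) against the expected range(2, maxEven+1, 2).
import Mathlib
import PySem

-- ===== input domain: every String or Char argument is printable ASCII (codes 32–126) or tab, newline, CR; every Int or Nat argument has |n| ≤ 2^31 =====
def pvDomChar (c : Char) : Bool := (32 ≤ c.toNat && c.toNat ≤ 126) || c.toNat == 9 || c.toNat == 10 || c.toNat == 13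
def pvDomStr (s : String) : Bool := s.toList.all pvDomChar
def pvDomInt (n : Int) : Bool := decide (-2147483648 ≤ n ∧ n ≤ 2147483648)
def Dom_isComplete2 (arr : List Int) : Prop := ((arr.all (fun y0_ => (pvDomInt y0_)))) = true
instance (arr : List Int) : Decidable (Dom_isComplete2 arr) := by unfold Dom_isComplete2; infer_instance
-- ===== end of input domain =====

-- B replaces A's per-even rescans of arr by one pass collecting the evens into a set
-- and a single sorted-list comparison against the expected range (objective: alternative).

-- ===== PORT A =====
-- inner 'for i in arr: if v == i: found = 1; break'
def pvInnerA (v : Int) : List Int → Int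
  | [] => 0
  | i :: rest => if v == i then 1 else pvInnerA v rest

-- 'for v in range(2, maxEven, 2): … if found == 0: return 0' then 'return 1'
def pvPhase2A (arr : List Int) : List Int → Int
  | [] => 1
  | v :: vs => if pvInnerA v arr == 0 then 0 else pvPhase2A arr vs

-- first loop of A, carrying maxEven : Option Int (None = Python None)
def pvScanA (arr0 : List Int) : List Int → Option Int → Int
  | [], maxEven =>
    match maxEven with
    | none => 0
    | some m => pvPhase2A arr0 (PySem.List.pyRange 2 m 2)
  | i :: rest, maxEven =>
    if i ≤ 0 then 0
    else if PySem.Int.mod i 2 == 0 then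
      pvScanA arr0 rest
        (match maxEven with
         | none => some i
         | some m => if i > m then some i else some m)
    else pvScanA arr0 rest maxEven

def isComplete2 (arr : List Int) : Int := pvScanA arr arr none

-- ===== PORT B =====
-- B's single pass: return 0 at the first nonpositive element, collect evens into a set
def pvLoopB : List Int → PySem.Set Int → Int
  | [], evens =>
    if evens = [] then 0
    else
      match PySem.List.max? evens (fun x => x) with
      | none => 0   -- unreachable: evens ≠ []
      | some m =>
        if PySem.List.sorted evens (fun x => x) = PySem.List.pyRange 2 (m + 1) 2 then 1 else 0
  | i :: rest, evens =>
    if i ≤ 0 then 0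
    else pvLoopB rest (if PySem.Int.mod i 2 == 0 then PySem.Set.add evens i else evens)

def isComplete2_alt (arr : List Int) : Int := pvLoopB arr PySem.Set.empty

-- ===== PRECONDITION & SPEC =====
def Spec_isComplete2 (arr : List Int) (out : Int) : Prop := out = isComplete2_alt arr
instance (arr : List Int) (out : Int) : Decidable (Spec_isComplete2 arr out) := by unfold Spec_isComplete2; infer_instance

-- ===== CLAIM (what is proved, stated in full; the proofs are below) =====
def Claim_equal_isComplete2 : Prop := ∀ (arr : List Int), Dom_isComplete2 arr → Spec_isComplete2 arr (isComplete2 arr)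

-- ===== LEMMAS AND PROOFS =====

-- pvInnerA is a membership test
lemma pvInnerA_eq (v : Int) (l : List Int) :
    pvInnerA v l = if v ∈ l then 1 else 0 := by
  induction l with
  | nil => simp [pvInnerA]
  | cons i rest ih =>
    by_cases h : v = i <;> simp [pvInnerA, h, ih]

-- pvPhase2A tests that every listed value occurs in arr
lemma pvPhase2A_eq (arr : List Int) (vs : List Int) :
    pvPhase2A arr vs = if ∀ v ∈ vs, v ∈ arr then 1 else 0 := by
  induction vs with
  | nil => simp [pvPhase2A]
  | cons v vs ih =>
    by_cases h : v ∈ arr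
    · simp only [pvPhase2A, pvInnerA_eq, if_pos h]
      simpa [ih] using by by_cases h2 : ∀ w ∈ vs, w ∈ arr <;> simp [h, h2]
    · simp [pvPhase2A, pvInnerA_eq, h]

lemma pyRange_two_pairwise (a b : Int) :
    (PySem.List.pyRange a b 2).Pairwise (· < ·) := by
  rw [PySem.List.pyRange_of_pos a b (by norm_num)]
  exact List.pairwise_lt_range.map _ (fun k j (h : k < j) => by omega)

lemma pyRange_two_nodup (a b : Int) : (PySem.List.pyRange a b 2).Nodup :=
  (pyRange_two_pairwise a b).imp (fun h => ne_of_lt h)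

lemma mem_pyRange_two (a b x : Int) :
    x ∈ PySem.List.pyRange a b 2 ↔ a ≤ x ∧ x < b ∧ (2 : Int) ∣ x - a :=
  PySem.List.mem_pyRange_iff_of_pos (by norm_num) x

lemma mod_two_eq_zero_iff (x : Int) : PySem.Int.mod x 2 = 0 ↔ (2 : Int) ∣ x := by
  rw [PySem.Int.mod, Int.fmod_eq_emod, if_pos (Or.inl (by norm_num : (0:Int) ≤ 2))]
  omega

-- the finish: A's per-even rescan of arr equals B's sorted-vs-range comparison
lemma finish_eq (arr0 : List Int) (s : List Int) (mx : Int)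
    (hnd : s.Nodup)
    (hmax : PySem.List.max? s (fun x => x) = some mx)
    (hiff : ∀ x : Int, x ∈ s ↔ (x ∈ arr0 ∧ PySem.Int.mod x 2 = 0))
    (hpos : ∀ x ∈ s, 0 < x) :
    pvPhase2A arr0 (PySem.List.pyRange 2 mx 2)
      = if PySem.List.sorted s (fun x => x) = PySem.List.pyRange 2 (mx + 1) 2 then 1 else 0 := by
  have hmxs : mx ∈ s := PySem.List.max?_mem hmax
  have hmxle : ∀ x ∈ s, x ≤ mx := PySem.List.max?_isMax hmax
  have hmx2 : (2 : Int) ∣ mx := (mod_two_eq_zero_iff mx).1 ((hiff mx).1 hmxs).2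
  have hmx0 : 0 < mx := hpos mx hmxs
  rw [pvPhase2A_eq]
  have key : (∀ v ∈ PySem.List.pyRange 2 mx 2, v ∈ arr0)
      ↔ PySem.List.sorted s (fun x => x) = PySem.List.pyRange 2 (mx + 1) 2 := by
    constructor
    · intro H
      apply PySem.List.sorted_eq_of_perm_of_pairwise_lt s _ _ ?_ (pyRange_two_pairwise 2 (mx + 1))
      rw [List.perm_ext_iff_of_nodup (pyRange_two_nodup 2 (mx + 1)) hnd]
      intro x
      rw [mem_pyRange_two]
      constructor
      · rintro ⟨h1, h2, h3⟩
        by_cases hx : x = mx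
        · exact hx ▸ hmxs
        · have hxlt : x < mx := by omega
          have : x ∈ arr0 := H x ((mem_pyRange_two 2 mx x).2 ⟨h1, hxlt, h3⟩)
          exact (hiff x).2 ⟨this, (mod_two_eq_zero_iff x).2 (by omega)⟩
      · intro hx
        have h2 : (2 : Int) ∣ x := (mod_two_eq_zero_iff x).1 ((hiff x).1 hx).2
        have h0 : 0 < x := hpos x hx
        have hle : x ≤ mx := hmxle x hx
        exact ⟨by omega, by omega, by omega⟩
    · intro Heq v hv
      rw [mem_pyRange_two] at hv
      have : v ∈ PySem.List.pyRange 2 (mx + 1) 2 := (mem_pyRange_two 2 (mx + 1) v).2 ⟨hv.1, by omega, hv.2.2⟩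
      rw [← Heq, PySem.List.mem_sorted] at this
      exact ((hiff v).1 this).1
  by_cases hc : ∀ v ∈ PySem.List.pyRange 2 mx 2, v ∈ arr0
  · rw [if_pos hc, if_pos (key.1 hc)]
  · rw [if_neg hc, if_neg (fun h => hc (key.2 h))]

-- the maxEven update of A is max?-update of the set
lemma updMax_eq (s : List Int) (i : Int) :
    PySem.List.max? (s ++ [i]) (fun x => x)
      = some (match PySem.List.max? s (fun x => x) with
              | none => i
              | some m => if i > m then i else m) := by
  cases s with
  | nil =>
    rw [List.nil_append, PySem.List.max?_id_cons, (PySem.List.max?_eq_none_iff ([]:List Int) _).2 rfl]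
    rfl
  | cons h t =>
    rw [List.cons_append, PySem.List.max?_id_cons, PySem.List.max?_id_cons, List.foldl_append]
    simp only [List.foldl_cons, List.foldl_nil]
    congr 1
    by_cases hc : i > List.foldl max h t <;> simp [hc, max_def] <;> omega

-- parallel loop invariant: A's scan = B's loop
lemma loop_eq (arr0 : List Int) (l : List Int) (m : Option Int) (s : PySem.Set Int)
    (hnd : s.Nodup)
    (hm : m = PySem.List.max? s (fun x => x))
    (hpos : ∀ x ∈ s, 0 < x)
    (hiff : ∀ x : Int, (x ∈ arr0 ∧ PySem.Int.mod x 2 = 0) ↔ (x ∈ s ∨ (x ∈ l ∧ PySem.Int.mod x 2 = 0))) :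
    pvScanA arr0 l m = pvLoopB l s := by
  induction l generalizing m s with
  | nil =>
    subst hm
    cases hs : PySem.List.max? s (fun x => x) with
    | none =>
      have : s = [] := (PySem.List.max?_eq_none_iff s _).1 hs
      subst this
      simp [pvScanA, pvLoopB]
    | some mx =>
      have hne : s ≠ [] := by
        intro h; subst h
        rw [(PySem.List.max?_eq_none_iff ([]:List Int) _).2 rfl] at hs; simp at hs
      simp only [pvScanA, pvLoopB, hs, if_neg hne]
      exact finish_eq arr0 s mx hnd hs
        (fun x => by have := hiff x; simpa using this.symm) hpos
  | cons i rest ih =>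
    by_cases hi : i ≤ 0
    · simp [pvScanA, pvLoopB, hi]
    · have hipos : 0 < i := by omega
      by_cases he : PySem.Int.mod i 2 = 0
      · simp only [pvScanA, pvLoopB, if_neg hi, he, beq_self_eq_true, if_pos trivial]
        by_cases hmem : i ∈ s
        · rw [PySem.Set.add_of_mem hmem]
          apply ih _ s hnd _ hpos
          · intro x
            have := hiff x
            constructor
            · intro hx
              rcases (this.1 hx) with h1 | ⟨h2, h3⟩
              · exact Or.inl h1
              · rcases List.mem_cons.1 h2 with rfl | h4
                · exact Or.inl hmem
                · exact Or.inr ⟨h4, h3⟩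
            · intro hx
              apply this.2
              rcases hx with h1 | ⟨h2, h3⟩
              · exact Or.inl h1
              · exact Or.inr ⟨List.mem_cons_of_mem _ h2, h3⟩
          · cases hm' : PySem.List.max? s (fun x => x) with
            | none =>
              exact absurd ((PySem.List.max?_eq_none_iff s _).1 hm') (by intro h; subst h; simp at hmem)
            | some mx =>
              have hle : i ≤ mx := PySem.List.max?_isMax hm' i hmem
              rw [hm] at *
              rw [hm']
              have : ¬ (i > mx) := by omega
              simp [this]
        · rw [PySem.Set.add_of_not_mem hmem]
          apply ih _ _ (by simp [List.nodup_append, hnd]; exact fun a ha h => hmem (by rw [← h]; exact ha))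
          · rw [hm, updMax_eq s i]
            cases PySem.List.max? s (fun x => x) with
            | none => rfl
            | some mx => by_cases hgt : i > mx <;> simp [hgt]
          · intro x hx
            rcases List.mem_append.1 hx with h1 | h2
            · exact hpos x h1
            · simp at h2; omega
          · intro x
            have := hiff x
            constructor
            · intro hx
              rcases (this.1 hx) with h1 | ⟨h2, h3⟩
              · exact Or.inl (List.mem_append.2 (Or.inl h1))
              · rcases List.mem_cons.1 h2 with rfl | h4
                · exact Or.inl (List.mem_append.2 (Or.inr (by simp)))
                · exact Or.inr ⟨h4, h3⟩
            · intro hx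
              apply this.2
              rcases hx with h1 | ⟨h2, h3⟩
              · rcases List.mem_append.1 h1 with h4 | h5
                · exact Or.inl h4
                · simp at h5; subst h5; exact Or.inr ⟨by simp, he⟩
              · exact Or.inr ⟨List.mem_cons_of_mem _ h2, h3⟩
      · have heb : (PySem.Int.mod i 2 == 0) = false := by simpa using he
        simp only [pvScanA, pvLoopB, if_neg hi, heb, Bool.false_eq_true, if_false]
        apply ih _ _ hnd hm hpos
        intro x
        have := hiff x
        constructor
        · intro hx
          rcases (this.1 hx) with h1 | ⟨h2, h3⟩
          · exact Or.inl h1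
          · rcases List.mem_cons.1 h2 with rfl | h4
            · exact absurd h3 he
            · exact Or.inr ⟨h4, h3⟩
        · intro hx
          apply this.2
          rcases hx with h1 | ⟨h2, h3⟩
          · exact Or.inl h1
          · exact Or.inr ⟨List.mem_cons_of_mem _ h2, h3⟩

-- ===== VERDICT (by name: the statement is the Claim_ definition above) =====
theorem isComplete2_spec : Claim_equal_isComplete2 := by
  intro arr _
  unfold Spec_isComplete2 isComplete2 isComplete2_alt
  exact loop_eq arr arr none PySem.Set.empty (by simp [PySem.Set.empty]) (by rw [show PySem.Set.empty = ([] : List Int) from rfl]; rw [(PySem.List.max?_eq_none_iff [] _).2 rfl]) (by simp [PySem.Set.empty]) (by intro x; simp [PySem.Set.empty])
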